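-- pv_equiv track=rewrite | github.com/cmbi/gold_standard | aln_quality/aln_analyzer.py | get_max_sp_score
-- ===== SOURCE A (Python) =====
-- def get_max_sp_score(golden_aln):
--     seq1, seq2 = golden_aln.values()
--     id1, id2 = golden_aln.keys()
--     score = 0
--     for i in range(len(golden_aln[id1])):
--         if seq1[i] != '-' and seq2[i] != '-':
--             score += 2
--         elif seq1[i] != '-' or seq2[i] != '-':
--             score += 1
--     return score
-- ===== SOURCE B (Python) =====
-- def get_max_sp_score(golden_aln):
--     # Score = non-gap chars in seq1 + non-gap chars in the aligned prefix of seq2: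
--     # each column contributes 1 per non-gap character (2 if both, 1 if one, 0 if none).
--     seq1, seq2 = golden_aln.values()
--     n = len(seq1)
--     s2 = seq2[:n]
--     return (n - seq1.count('-')) + (len(s2) - s2.count('-'))
-- ===== Notes on version B (the rewrite author's own statement) =====
-- stated objective: simpler
-- what changed: Replaces the per-column loop with its two branch tests by two gap-counting passes: the SP score equals the number of non-gap characters in seq1 plus in the aligned prefix of seq2, computed with len and str.count.
import Mathlib
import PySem

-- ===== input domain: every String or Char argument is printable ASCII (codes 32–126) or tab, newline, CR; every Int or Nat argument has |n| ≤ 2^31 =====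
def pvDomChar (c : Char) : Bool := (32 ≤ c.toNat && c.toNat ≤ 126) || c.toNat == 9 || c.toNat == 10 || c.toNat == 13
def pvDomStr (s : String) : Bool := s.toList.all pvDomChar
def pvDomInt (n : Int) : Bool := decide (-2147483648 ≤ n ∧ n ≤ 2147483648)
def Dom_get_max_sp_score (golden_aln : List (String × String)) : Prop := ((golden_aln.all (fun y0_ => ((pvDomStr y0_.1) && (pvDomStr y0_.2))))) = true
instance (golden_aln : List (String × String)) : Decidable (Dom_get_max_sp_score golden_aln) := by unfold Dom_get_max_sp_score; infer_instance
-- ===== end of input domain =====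

-- B replaces A's per-column loop with two gap-counting passes (len/str.count); same O(n) cost, simpler code.

-- ===== PORT A =====
-- Literal port of A: unpack the two (key, value) pairs, look the first key up in the dict,
-- loop over range(len(...)) adding 2/1/0 per column. Where the Python raises (≠ 2 items,
-- or seq2 shorter so seq2[i] is an IndexError), which Pre_ excludes, pyGetD's default is used.
def get_max_sp_score (golden_aln : List (String × String)) : Int :=
  match golden_aln with
  | [(id1, seq1), (_id2, seq2)] =>
    let c1 := seq1.toList
    let c2 := seq2.toList
    let t := ((PySem.Dict.ofList golden_aln).getD id1 "").toList
    (PySem.List.pyRange 0 (t.length : Int) 1).foldl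
      (fun score i =>
        if PySem.List.pyGetD c1 i ' ' ≠ '-' ∧ PySem.List.pyGetD c2 i ' ' ≠ '-' then score + 2
        else if PySem.List.pyGetD c1 i ' ' ≠ '-' ∨ PySem.List.pyGetD c2 i ' ' ≠ '-' then score + 1
        else score) 0
  | _ => 0  -- Python raises ValueError unpacking; excluded by Pre_

-- ===== PORT B =====
def get_max_sp_score_alt (golden_aln : List (String × String)) : Int :=
  if golden_aln.length = 2 then
    let c1 := (golden_aln.getD 0 ("", "")).2.toList
    let n := c1.length
    let s2 := PySem.List.slice (golden_aln.getD 1 ("", "")).2.toList none (some (n : Int))   -- seq2[:n]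
    ((n : Int) - c1.count '-') + ((s2.length : Int) - s2.count '-')
  else 0  -- Python raises ValueError unpacking; excluded by Pre_

-- ===== PRECONDITION & SPEC =====
-- Pre_: exactly the inputs where A returns — a two-entry dict (distinct keys, as any Python
-- dict has) whose second sequence is at least as long as the first (else seq2[i] raises IndexError).
def Pre_get_max_sp_score (golden_aln : List (String × String)) : Prop :=
  golden_aln.length = 2 ∧
  (golden_aln.getD 0 ("", "")).1 ≠ (golden_aln.getD 1 ("", "")).1 ∧
  (golden_aln.getD 0 ("", "")).2.toList.length ≤ (golden_aln.getD 1 ("", "")).2.toList.length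
instance (golden_aln : List (String × String)) : Decidable (Pre_get_max_sp_score golden_aln) := by
  unfold Pre_get_max_sp_score; infer_instance
def pvWitness_get_max_sp_score : (List (String × String)) := [("a", "AB-C"), ("b", "-BXC")]

def Spec_get_max_sp_score (golden_aln : List (String × String)) (out : Int) : Prop :=
  out = get_max_sp_score_alt golden_aln
instance (golden_aln : List (String × String)) (out : Int) : Decidable (Spec_get_max_sp_score golden_aln out) := by
  unfold Spec_get_max_sp_score; infer_instance

-- ===== CLAIM (what is proved, stated in full; the proofs are below) =====
def Claim_equal_get_max_sp_score : Prop := ∀ (golden_aln : List (String × String)), Dom_get_max_sp_score golden_aln → Pre_get_max_sp_score golden_aln → Spec_get_max_sp_score golden_aln (get_max_sp_score golden_aln)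

-- ===== LEMMAS AND PROOFS =====

-- Σ_{k<n} [c[k] ≠ '-'] = n - (gaps among the first n characters of c)
theorem pv_ind_sum (c : List Char) (n : Nat) (h : n ≤ c.length) :
    ((List.range n).map (fun k => if c.getD k ' ' ≠ '-' then (1 : Int) else 0)).sum
      = (n : Int) - ((c.take n).count '-') := by
  induction n with
  | zero => simp
  | succ m ih =>
    have hm : m < c.length := by omega
    have hsum := ih (by omega)
    have htake : c.take (m + 1) = c.take m ++ [c.getD m ' '] := by
      rw [List.take_add_one]
      simp [List.getD, List.getElem?_eq_getElem hm]
    rw [List.range_succ, List.map_append, List.sum_append, hsum, htake, List.count_append]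
    simp only [List.map_cons, List.map_nil, List.sum_cons, List.sum_nil,
      List.count_cons, List.count_nil]
    by_cases hc : c.getD m ' ' = '-' <;>
      simp only [hc, ite_not, beq_iff_eq, beq_self_eq_true] <;>
      simp <;> push_cast <;> omega

theorem pv_spec_aux (k1 k2 s1 s2 : String)
    (hk : k1 ≠ k2) (hl : s1.toList.length ≤ s2.toList.length) :
    get_max_sp_score [(k1, s1), (k2, s2)] = get_max_sp_score_alt [(k1, s1), (k2, s2)] := by
  have hdict : ((PySem.Dict.ofList [(k1, s1), (k2, s2)]).getD k1 "") = s1 := by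
    show ((PySem.Dict.empty.insert k1 s1).insert k2 s2).getD k1 "" = s1
    rw [PySem.Dict.getD_insert_of_ne _ _ _ hk, PySem.Dict.getD_insert_self]
  show (PySem.List.pyRange 0 (((PySem.Dict.ofList [(k1, s1), (k2, s2)]).getD k1 "").toList.length : Int) 1).foldl _ 0 = _
  rw [hdict]
  set c1 := s1.toList with hc1
  set c2 := s2.toList with hc2
  rw [PySem.List.pyRange_zero_nat c1.length]
  have hfold : ∀ (l : List Int) (f : Int → Int) (init : Int),
      l.foldl (fun s i =>
        if PySem.List.pyGetD c1 i ' ' ≠ '-' ∧ PySem.List.pyGetD c2 i ' ' ≠ '-' then s + 2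
        else if PySem.List.pyGetD c1 i ' ' ≠ '-' ∨ PySem.List.pyGetD c2 i ' ' ≠ '-' then s + 1
        else s) init
      = init + (l.map (fun i =>
          (if PySem.List.pyGetD c1 i ' ' ≠ '-' then (1 : Int) else 0)
          + (if PySem.List.pyGetD c2 i ' ' ≠ '-' then (1 : Int) else 0))).sum := by
    intro l f init
    induction l generalizing init with
    | nil => simp
    | cons x xs ih =>
      simp only [List.foldl_cons, List.map_cons, List.sum_cons, ih]
      by_cases h1 : PySem.List.pyGetD c1 x ' ' = '-' <;>
        by_cases h2 : PySem.List.pyGetD c2 x ' ' = '-' <;> simp [h1, h2] <;> ring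
  rw [hfold _ id 0, zero_add, List.map_map]
  have hpt : (List.range c1.length).map
      ((fun i => (if PySem.List.pyGetD c1 i ' ' ≠ '-' then (1 : Int) else 0)
        + (if PySem.List.pyGetD c2 i ' ' ≠ '-' then (1 : Int) else 0)) ∘ (fun k : Nat => (k : Int)))
      = (List.range c1.length).map (fun k : Nat => (if c1.getD k ' ' ≠ '-' then (1 : Int) else 0)
        + (if c2.getD k ' ' ≠ '-' then (1 : Int) else 0)) := by
    apply List.map_congr_left
    intro k _
    simp [Function.comp, PySem.List.pyGetD_natCast]
  rw [hpt]
  have hsplit : ((List.range c1.length).map (fun k : Nat =>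
      (if c1.getD k ' ' ≠ '-' then (1 : Int) else 0)
      + (if c2.getD k ' ' ≠ '-' then (1 : Int) else 0))).sum
      = ((List.range c1.length).map (fun k => if c1.getD k ' ' ≠ '-' then (1 : Int) else 0)).sum
      + ((List.range c1.length).map (fun k => if c2.getD k ' ' ≠ '-' then (1 : Int) else 0)).sum := by
    induction (List.range c1.length) with
    | nil => simp
    | cons x xs ih => simp only [List.map_cons, List.sum_cons, ih]; ring
  rw [hsplit, pv_ind_sum c1 c1.length le_rfl, pv_ind_sum c2 c1.length hl,
    List.take_length]
  show _ = ((c1.length : Int) - c1.count '-')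
      + (((PySem.List.slice c2 none (some (c1.length : Int))).length : Int)
        - (PySem.List.slice c2 none (some (c1.length : Int))).count '-')
  rw [PySem.List.slice_to_natCast]
  have : (c2.take c1.length).length = c1.length := by
    rw [List.length_take]; omega
  rw [this]

-- ===== VERDICT (by name: the statement is the Claim_ definition above) =====
theorem get_max_sp_score_spec : Claim_equal_get_max_sp_score := by
  intro g _ hpre
  obtain ⟨hlen, hk, hl⟩ := hpre
  match g, hlen with
  | [(k1, s1), (k2, s2)], _ =>
    simp only [List.getD, List.getElem?_cons_zero, List.getElem?_cons_succ, Option.getD_some] at hk hl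
    exact pv_spec_aux k1 k2 s1 s2 hk hl
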